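-- pv_equiv track=rewrite | github.com/TCDSolar/xrayvision | xrayvision/visibility.py | convert_units_to_tex
-- ===== SOURCE A (Python) =====
-- def convert_units_to_tex(string: str):
--     """
--     Convert from idl format to latex, if it already is there will be no conversation.
--
--     Parameters
--     ----------
--     string : `str`
--         The IDL format string to be converted
--
--     Returns
--     -------
--     `str`
--         The LATEX equivalent of the IDL format string
--
--     Examples
--     --------
--
--     Notes
--     -----
--
--     """
--     final_string = ""
--     opened = 0
--     check_for_instruction = False
--     for i in range(len(string)):
--         if check_for_instruction:
--             if string[i] == 'n':
--                 final_string += opened * "}"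
--                 opened = 0
--             elif string[i] == 'u':
--                 final_string += "^{"
--                 opened += 1
--             elif string[i] == 's':
--                 final_string += "_{"
--                 opened += 1
--             check_for_instruction = False
--         elif string[i] == '!':
--             check_for_instruction = True
--         else:
--             final_string += string[i]
--     final_string += opened * "}"
--     return final_string
-- ===== SOURCE B (Python) =====
-- def convert_units_to_tex(string: str):
--     # pass 1: tokenize into ('ch', c) literals and ('op', c) escape instructions
--     tokens = []
--     i = 0
--     n = len(string)
--     while i < n:
--         c = string[i]
--         if c == '!':
--             if i + 1 < n and string[i + 1] in ('n', 'u', 's'):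
--                 tokens.append(('op', string[i + 1]))
--             i += 2
--         else:
--             tokens.append(('ch', c))
--             i += 1
--     # pass 2: split the token stream into segments at 'n' instructions
--     segments = [[]]
--     for t in tokens:
--         if t == ('op', 'n'):
--             segments.append([])
--         else:
--             segments[-1].append(t)
--     # pass 3: render each segment, then close all groups it opened (count, no counter)
--     out = []
--     for seg in segments:
--         for t in seg:
--             if t == ('op', 'u'):
--                 out.append('^{')
--             elif t == ('op', 's'):
--                 out.append('_{')
--             else:
--                 out.append(t[1])
--         out.append('}' * sum(1 for t in seg if t[0] == 'op'))
--     return ''.join(out)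
-- ===== Notes on version B (the rewrite author's own statement) =====
-- stated objective: alternative
-- what changed: Replaces A's single-pass flag-FSM with a running opened counter by a three-stage pipeline: tokenize escapes, split the token stream into segments at the reset instruction, then render each segment and emit its closing braces by counting the instruction tokens it contains (no stateful counter).
import Mathlib
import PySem

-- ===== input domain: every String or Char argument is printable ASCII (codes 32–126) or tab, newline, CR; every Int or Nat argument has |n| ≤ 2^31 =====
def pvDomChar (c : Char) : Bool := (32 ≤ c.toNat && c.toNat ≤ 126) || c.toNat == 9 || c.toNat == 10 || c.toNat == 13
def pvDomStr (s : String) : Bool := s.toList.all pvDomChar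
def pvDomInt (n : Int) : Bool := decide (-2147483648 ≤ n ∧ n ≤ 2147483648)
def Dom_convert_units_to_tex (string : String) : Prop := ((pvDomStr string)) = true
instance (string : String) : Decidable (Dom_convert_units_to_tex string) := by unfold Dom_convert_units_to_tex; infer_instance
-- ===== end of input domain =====

-- B replaces A's flag-FSM with a running opened counter by a staged pipeline: tokenize escapes, split the token stream at the reset instruction, render each segment and close its groups by counting its instruction tokens (alternative decomposition, same cost).


-- ===== PORT A =====
-- A's for-loop over string[i] carrying (final_string, opened, check_for_instruction), as structural recursion over the character list.
def aRun : List Char → List Char → Nat → Bool → List Char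
  | [], acc, opened, _ => acc ++ List.replicate opened '}'
  | c :: rest, acc, opened, check =>
    if check then
      if c = 'n' then aRun rest (acc ++ List.replicate opened '}') 0 false
      else if c = 'u' then aRun rest (acc ++ ['^', '{']) opened.succ false
      else if c = 's' then aRun rest (acc ++ ['_', '{']) opened.succ false
      else aRun rest acc opened false
    else if c = '!' then aRun rest acc opened true
    else aRun rest (acc ++ [c]) opened false

def convert_units_to_tex (string : String) : String :=
  String.ofList (aRun string.toList [] 0 false)

-- ===== PORT B =====
-- B's pass 1: the while-loop tokenizer; ('ch', c) ↦ Tok.ch c, ('op', c) ↦ Tok.op c.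
inductive Tok
  | ch : Char → Tok
  | op : Char → Tok
deriving DecidableEq, Repr

def bTokenize : List Char → List Tok
  | [] => []
  | c :: rest =>
    if c = '!' then
      match rest with
      | [] => []
      | d :: rest' =>
        (if d = 'n' ∨ d = 'u' ∨ d = 's' then [Tok.op d] else []) ++ bTokenize rest'
    else Tok.ch c :: bTokenize rest

-- B's pass 2: split the token stream into segments at the reset instruction token.
def bSegments : List Tok → List (List Tok)
  | [] => [[]]
  | t :: ts =>
    if t = Tok.op 'n' then [] :: bSegments ts
    else
      match bSegments ts with
      | [] => [[t]]   -- unreachable: bSegments never returns []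
      | s :: ss => (t :: s) :: ss

-- B's pass 3 inner loop: render one token of a segment.
def bPiece : Tok → List Char
  | t => if t = Tok.op 'u' then ['^', '{']
         else if t = Tok.op 's' then ['_', '{']
         else match t with | Tok.ch c => [c] | Tok.op c => [c]

-- B's 'sum(1 for t in seg if t[0] == 'op')'.
def bOpens (seg : List Tok) : Nat :=
  seg.countP (fun t => match t with | Tok.op _ => true | _ => false)

-- B's pass 3 over the segments, pieces joined once at the end.
def bOut (ss : List (List Tok)) : List Char :=
  ss.flatMap (fun seg => seg.flatMap bPiece ++ List.replicate (bOpens seg) '}')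

def convert_units_to_tex_alt (string : String) : String :=
  String.ofList (bOut (bSegments (bTokenize string.toList)))

-- ===== PRECONDITION & SPEC =====
def Spec_convert_units_to_tex (string : String) (out : String) : Prop := out = convert_units_to_tex_alt string
instance (string : String) (out : String) : Decidable (Spec_convert_units_to_tex string out) := by unfold Spec_convert_units_to_tex; infer_instance

-- ===== CLAIM (what is proved, stated in full; the proofs are below) =====
def Claim_equal_convert_units_to_tex : Prop := ∀ (string : String), Dom_convert_units_to_tex string → Spec_convert_units_to_tex string (convert_units_to_tex string)

-- ===== LEMMAS AND PROOFS =====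
-- Proof-side middle form: a lookahead loop carrying the pending-open count.
def hLoop : List Char → Nat → List Char
  | [], opened => List.replicate opened '}'
  | c :: rest, opened =>
    if c = '!' then
      match rest with
      | [] => List.replicate opened '}'
      | d :: rest' =>
        if d = 'n' then List.replicate opened '}' ++ hLoop rest' 0
        else if d = 'u' then '^' :: '{' :: hLoop rest' (opened + 1)
        else if d = 's' then '_' :: '{' :: hLoop rest' (opened + 1)
        else hLoop rest' opened
    else c :: hLoop rest opened

-- Step 1: A's flag-FSM equals the lookahead loop (flag-off ↦ hLoop l, flag-on ↦ hLoop ('!'::l)).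
theorem aRun_eq_hLoop (l : List Char) : ∀ (acc : List Char) (opened : Nat),
    aRun l acc opened false = acc ++ hLoop l opened ∧
    aRun l acc opened true = acc ++ hLoop ('!' :: l) opened := by
  induction l with
  | nil => intro acc opened; simp [aRun, hLoop]
  | cons c rest ih =>
    intro acc opened
    refine ⟨?_, ?_⟩
    · by_cases hc : c = '!'
      · subst hc
        simpa [aRun] using (ih acc opened).2
      · simp only [aRun, Bool.false_eq_true, if_false, if_neg hc]
        rw [(ih (acc ++ [c]) opened).1]
        conv_rhs => rw [hLoop.eq_def]
        simp [hc]
    · by_cases hn : c = 'n'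
      · subst hn
        simp only [aRun, hLoop, if_true]
        rw [(ih (acc ++ List.replicate opened '}') 0).1]
        simp
      · by_cases hu : c = 'u'
        · subst hu
          simp only [aRun, hLoop, if_true]
          rw [(ih (acc ++ ['^', '{']) opened.succ).1]
          simp
        · by_cases hs : c = 's'
          · subst hs
            simp only [aRun, hLoop, if_true]
            rw [(ih (acc ++ ['_', '{']) opened.succ).1]
            simp
          · simp only [aRun, hLoop, if_true, if_neg hn, if_neg hu, if_neg hs]
            exact (ih acc opened).1

theorem bSegments_ne_nil (ts : List Tok) : bSegments ts ≠ [] := by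
  cases ts with
  | nil => simp [bSegments]
  | cons t ts =>
    simp only [bSegments]
    split
    · simp
    · cases h : bSegments ts <;> simp

-- Segment list rendered with an extra 'opened' pending count on the first segment.
def mFirst : List (List Tok) → Nat → List Char
  | [], opened => List.replicate opened '}'
  | s :: ss, opened => s.flatMap bPiece ++ List.replicate (bOpens s + opened) '}' ++ bOut ss

theorem bOut_eq_mFirst_zero (ss : List (List Tok)) (h : ss ≠ []) : bOut ss = mFirst ss 0 := by
  cases ss with
  | nil => exact absurd rfl h
  | cons s ss => simp [bOut, mFirst]

theorem bOpens_op (c : Char) (s : List Tok) : bOpens (Tok.op c :: s) = bOpens s + 1 := by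
  simp [bOpens]

theorem bOpens_ch (c : Char) (s : List Tok) : bOpens (Tok.ch c :: s) = bOpens s := by
  simp [bOpens]

-- Step 2: the lookahead loop equals B's staged pipeline.
theorem hLoop_eq_pipeline (l : List Char) (opened : Nat) :
    hLoop l opened = mFirst (bSegments (bTokenize l)) opened := by
  induction l, opened using hLoop.induct with
  | case1 opened => simp [hLoop, bTokenize, bSegments, mFirst, bOpens, bOut]
  | case2 opened => simp [hLoop, bTokenize, bSegments, mFirst, bOpens, bOut]
  | case3 opened rest' ih =>
    simp only [hLoop]
    rw [ih, ← bOut_eq_mFirst_zero _ (bSegments_ne_nil (bTokenize rest'))]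
    simp [bTokenize, bSegments, mFirst, bOpens]
  | case4 opened rest' _ ih =>
    cases h : bSegments (bTokenize rest') with
    | nil => exact absurd h (bSegments_ne_nil _)
    | cons s ss =>
      simp only [hLoop]
      rw [ih, h]
      have e : bOpens s + 1 + opened = bOpens s + (opened + 1) := by omega
      simp [bTokenize, bSegments, h, mFirst, bPiece, bOpens_op, e]
  | case5 opened rest' _ _ ih =>
    cases h : bSegments (bTokenize rest') with
    | nil => exact absurd h (bSegments_ne_nil _)
    | cons s ss =>
      simp only [hLoop]
      rw [ih, h]
      have e : bOpens s + 1 + opened = bOpens s + (opened + 1) := by omega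
      simp [bTokenize, bSegments, h, mFirst, bPiece, bOpens_op, e]
  | case6 opened d rest' hn hu hs ih =>
    simp only [hLoop, if_neg hn, if_neg hu, if_neg hs]
    rw [ih]
    simp [bTokenize, hn, hu, hs]
  | case7 c rest opened hc ih =>
    cases h : bSegments (bTokenize rest) with
    | nil => exact absurd h (bSegments_ne_nil _)
    | cons s ss =>
      rw [hLoop.eq_def]
      simp only [if_neg hc]
      rw [ih, h, bTokenize.eq_def]
      simp only [if_neg hc]
      simp [bSegments, h, mFirst, bPiece, bOpens_ch]

-- ===== VERDICT (by name: the statement is the Claim_ definition above) =====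
theorem convert_units_to_tex_spec : Claim_equal_convert_units_to_tex := by
  intro s _
  unfold Spec_convert_units_to_tex convert_units_to_tex convert_units_to_tex_alt
  rw [(aRun_eq_hLoop s.toList [] 0).1, hLoop_eq_pipeline s.toList 0,
      bOut_eq_mFirst_zero _ (bSegments_ne_nil _)]
  simp
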